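-- pv_equiv track=rewrite | github.com/odiouschipmunk/vision | to give/squash/Functions.py | count_wall_hits
-- ===== SOURCE A (Python) =====
-- def count_wall_hits(past_ball_pos, threshold=10):
--     """
--     Count number of wall hits based on direction changes
--     """
--     wall_hits = 0
--     for i in range(1, len(past_ball_pos) - 1):
--         x1, y1, _ = past_ball_pos[i - 1]
--         x2, y2, _ = past_ball_pos[i]
--         x3, y3, _ = past_ball_pos[i + 1]
--
--         if abs(x2 - x1) < threshold and abs(x3 - x2) < threshold:
--             wall_hits += 1
--     return wall_hits
-- ===== SOURCE B (Python) =====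
-- def count_wall_hits(past_ball_pos, threshold=10):
--     """
--     Count number of wall hits based on direction changes
--     """
--     xs = [p[0] for p in past_ball_pos]
--     runs = []
--     cur = 0
--     for a, b in zip(xs, xs[1:]):
--         if abs(b - a) < threshold:
--             cur += 1
--         else:
--             if cur:
--                 runs.append(cur)
--             cur = 0
--     if cur:
--         runs.append(cur)
--     return sum(r - 1 for r in runs)
-- ===== Notes on version B (the rewrite author's own statement) =====
-- stated objective: alternative
-- what changed: B replaces A's per-index test of two neighbouring x-differences by run-length encoding: it collects the lengths of maximal runs of consecutive small x-changes and sums (length - 1) over the runs, which equals the number of index triples A counts.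
import Mathlib
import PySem

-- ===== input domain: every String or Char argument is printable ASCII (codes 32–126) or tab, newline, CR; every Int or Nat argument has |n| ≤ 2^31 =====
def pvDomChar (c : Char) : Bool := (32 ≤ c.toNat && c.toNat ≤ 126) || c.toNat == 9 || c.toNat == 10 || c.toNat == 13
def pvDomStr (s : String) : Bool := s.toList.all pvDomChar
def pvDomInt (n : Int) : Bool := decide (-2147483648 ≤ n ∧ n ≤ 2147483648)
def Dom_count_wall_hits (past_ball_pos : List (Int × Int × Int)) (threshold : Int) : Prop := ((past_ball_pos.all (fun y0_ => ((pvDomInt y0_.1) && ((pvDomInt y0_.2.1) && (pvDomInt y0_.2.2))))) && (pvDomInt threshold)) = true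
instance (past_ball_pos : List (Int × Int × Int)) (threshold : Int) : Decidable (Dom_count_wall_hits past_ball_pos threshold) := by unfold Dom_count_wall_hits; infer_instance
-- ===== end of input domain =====

-- B replaces A's per-index double-difference test by run-length encoding of the small
-- x-change gaps, summing (run length - 1) over maximal runs; alternative decomposition,
-- same return value (return-value equivalence proved below).


-- ===== PORT A =====
-- indices i-1, i, i+1 are always in range, so pyGetD's default is never read
def count_wall_hits (past_ball_pos : List (Int × Int × Int)) (threshold : Int) : Int :=
  (PySem.List.pyRange 1 ((past_ball_pos.length : Int) - 1) 1).foldl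
    (fun wall_hits i =>
      let p1 := PySem.List.pyGetD past_ball_pos (i - 1) (0, 0, 0)
      let p2 := PySem.List.pyGetD past_ball_pos i (0, 0, 0)
      let p3 := PySem.List.pyGetD past_ball_pos (i + 1) (0, 0, 0)
      if |p2.1 - p1.1| < threshold ∧ |p3.1 - p2.1| < threshold then wall_hits + 1
      else wall_hits) 0

-- ===== PORT B =====
-- run-length encoding: fold state is (finished run lengths, length of current run)
def count_wall_hits_alt (past_ball_pos : List (Int × Int × Int)) (threshold : Int) : Int :=
  let xs := past_ball_pos.map (fun p => p.1)
  let st := (xs.zip xs.tail).foldl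
    (fun (acc : List Int × Int) ab =>
      if |ab.2 - ab.1| < threshold then (acc.1, acc.2 + 1)
      else if acc.2 ≠ 0 then (acc.1 ++ [acc.2], 0) else (acc.1, 0))
    ([], 0)
  let runs := if st.2 ≠ 0 then st.1 ++ [st.2] else st.1
  (runs.map (fun r => r - 1)).sum

-- ===== PRECONDITION & SPEC =====
def Spec_count_wall_hits (past_ball_pos : List (Int × Int × Int)) (threshold : Int) (out : Int) : Prop := out = count_wall_hits_alt past_ball_pos threshold
instance (past_ball_pos : List (Int × Int × Int)) (threshold : Int) (out : Int) : Decidable (Spec_count_wall_hits past_ball_pos threshold out) := by unfold Spec_count_wall_hits; infer_instance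

-- ===== CLAIM (what is proved, stated in full; the proofs are below) =====
def Claim_equal_count_wall_hits : Prop := ∀ (past_ball_pos : List (Int × Int × Int)) (threshold : Int), Dom_count_wall_hits past_ball_pos threshold → Spec_count_wall_hits past_ball_pos threshold (count_wall_hits past_ball_pos threshold)

-- ===== LEMMAS AND PROOFS =====

-- common reference value: one count per index triple with two small x-changes
def pvCount3 (t : Int) : List (Int × Int × Int) → Int
  | a :: b :: c :: r =>
      (if |b.1 - a.1| < t ∧ |c.1 - b.1| < t then 1 else 0) + pvCount3 t (b :: c :: r)
  | _ => 0

-- consecutive-True pair count of a Bool list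
def pvPairCount : List Bool → Int
  | x :: y :: r => (if x && y then 1 else 0) + pvPairCount (y :: r)
  | _ => 0

-- value contributed by a pending run of length c followed by the gap list l
def pvT (c : Int) : List Bool → Int
  | [] => if c = 0 then 0 else c - 1
  | true :: r => pvT (c + 1) r
  | false :: r => (if c = 0 then 0 else c - 1) + pvT 0 r

lemma pvT_shift (l : List Bool) : ∀ c : Int, 0 ≤ c → pvT (c + 1) l = c + pvT 1 l := by
  induction l with
  | nil => intro c hc; simp [pvT]; omega
  | cons b r ih =>
    intro c hc
    cases b with
    | true =>
      show pvT (c + 1 + 1) r = c + pvT (1 + 1) r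
      rw [ih (c + 1) (by omega), ih 1 (by omega)]; ring
    | false =>
      show (if c + 1 = 0 then 0 else c + 1 - 1) + pvT 0 r
          = c + ((if (1 : Int) = 0 then 0 else 1 - 1) + pvT 0 r)
      have : ¬ (c + 1 = 0) := by omega
      simp [this]

lemma pvPairCount_false (r : List Bool) : pvPairCount (false :: r) = pvPairCount r := by
  cases r <;> simp [pvPairCount]

lemma pvT_pairCount (l : List Bool) :
    pvT 0 l = pvPairCount l ∧ pvT 1 l = pvPairCount (true :: l) := by
  induction l with
  | nil => simp [pvT, pvPairCount]
  | cons b r ih =>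
    obtain ⟨h0, h1⟩ := ih
    cases b with
    | true =>
      constructor
      · show pvT 1 r = _; rw [h1]
      · show pvT (1 + 1) r = pvPairCount (true :: true :: r)
        rw [pvT_shift r 1 (by omega), h1]
        simp [pvPairCount]
    | false =>
      constructor
      · show (if (0:Int) = 0 then 0 else (0:Int) - 1) + pvT 0 r = pvPairCount (false :: r)
        rw [pvPairCount_false, h0]; simp
      · show (if (1:Int) = 0 then 0 else (1:Int) - 1) + pvT 0 r = pvPairCount (true :: false :: r)
        rw [h0]
        simp [pvPairCount, pvPairCount_false]

-- B's fold step, over the precomputed gap flags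
def pvStep (acc : List Int × Int) (b : Bool) : List Int × Int :=
  if b then (acc.1, acc.2 + 1)
  else if acc.2 ≠ 0 then (acc.1 ++ [acc.2], 0) else (acc.1, 0)

def pvFinish (st : List Int × Int) : Int :=
  ((if st.2 ≠ 0 then st.1 ++ [st.2] else st.1).map (fun r => r - 1)).sum

lemma pvFold_invariant (l : List Bool) :
    ∀ (rs : List Int) (c : Int), 0 ≤ c →
      pvFinish (l.foldl pvStep (rs, c)) = ((rs.map (fun r => r - 1)).sum) + pvT c l := by
  induction l with
  | nil =>
    intro rs c hc
    by_cases h : c = 0 <;> simp [pvFinish, pvT, h]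
  | cons b r ih =>
    intro rs c hc
    cases b with
    | true =>
      show pvFinish (r.foldl pvStep (rs, c + 1)) = _
      rw [ih rs (c + 1) (by omega)]
      rfl
    | false =>
      by_cases h : c = 0
      · show pvFinish (r.foldl pvStep (pvStep (rs, c) false)) = _
        simp only [pvStep, h, if_neg (Bool.false_ne_true), ne_eq, not_true_eq_false, if_false]
        rw [ih rs 0 (by omega)]
        simp [pvT]
      · show pvFinish (r.foldl pvStep (pvStep (rs, c) false)) = _
        simp only [pvStep, if_neg (Bool.false_ne_true), ne_eq, h, not_false_eq_true, if_true]
        rw [ih (rs ++ [c]) 0 (by omega)]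
        simp [pvT, h]
        ring

lemma pvB_eq_pairCount_gaps (xs : List Int) (t : Int) :
    (let st := (xs.zip xs.tail).foldl
        (fun (acc : List Int × Int) ab =>
          if |ab.2 - ab.1| < t then (acc.1, acc.2 + 1)
          else if acc.2 ≠ 0 then (acc.1 ++ [acc.2], 0) else (acc.1, 0)) ([], 0)
     let runs := if st.2 ≠ 0 then st.1 ++ [st.2] else st.1
     (runs.map (fun r => r - 1)).sum)
    = pvPairCount ((xs.zip xs.tail).map (fun ab => decide (|ab.2 - ab.1| < t))) := by
  have hfold : (xs.zip xs.tail).foldl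
      (fun (acc : List Int × Int) ab =>
        if |ab.2 - ab.1| < t then (acc.1, acc.2 + 1)
        else if acc.2 ≠ 0 then (acc.1 ++ [acc.2], 0) else (acc.1, 0)) ([], 0)
      = ((xs.zip xs.tail).map (fun ab => decide (|ab.2 - ab.1| < t))).foldl pvStep ([], 0) := by
    have hfun : (fun (acc : List Int × Int) (ab : Int × Int) =>
        if |ab.2 - ab.1| < t then (acc.1, acc.2 + 1)
        else if acc.2 ≠ 0 then (acc.1 ++ [acc.2], (0 : Int)) else (acc.1, 0))
        = (fun acc ab => pvStep acc (decide (|ab.2 - ab.1| < t))) := by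
      funext acc ab
      by_cases h : |ab.2 - ab.1| < t <;> simp [pvStep, h]
    rw [hfun, ← List.foldl_map]
  show pvFinish ((xs.zip xs.tail).foldl _ ([], 0)) = _
  rw [hfold, pvFold_invariant _ [] 0 (by omega)]
  simp [(pvT_pairCount _).1]

lemma pvPairCount_flags_eq_count3 (t : Int) (ps : List (Int × Int × Int)) :
    pvPairCount (((ps.map (fun p => p.1)).zip (ps.map (fun p => p.1)).tail).map
      (fun ab => decide (|ab.2 - ab.1| < t)))
    = pvCount3 t ps := by
  match ps with
  | [] => simp [pvPairCount, pvCount3]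
  | [a] => simp [pvPairCount, pvCount3]
  | [a, b] => simp [pvPairCount, pvCount3]
  | a :: b :: c :: r =>
    have ih := pvPairCount_flags_eq_count3 t (b :: c :: r)
    simp only [List.map_cons, List.tail_cons, List.zip_cons_cons] at ih ⊢
    rw [pvPairCount, pvCount3, ← ih]
    congr 1
    by_cases h1 : |b.1 - a.1| < t <;> by_cases h2 : |c.1 - b.1| < t <;> simp [h1, h2]
  termination_by ps.length

lemma pvA_countP_eq_count3 (t : Int) (ps : List (Int × Int × Int)) :
    ((List.range (ps.length - 2)).countP
      (fun k => decide (|(ps.getD (k + 1) (0,0,0)).1 - (ps.getD k (0,0,0)).1| < t ∧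
                        |(ps.getD (k + 2) (0,0,0)).1 - (ps.getD (k + 1) (0,0,0)).1| < t)) : Int)
    = pvCount3 t ps := by
  match ps with
  | [] => simp [pvCount3]
  | [a] => simp [pvCount3]
  | [a, b] => simp [pvCount3]
  | a :: b :: c :: r =>
    have ih := pvA_countP_eq_count3 t (b :: c :: r)
    have hlen : (a :: b :: c :: r).length - 2 = ((b :: c :: r).length - 2) + 1 := by
      simp
    rw [hlen, List.range_succ_eq_map, List.countP_cons, List.countP_map]
    rw [pvCount3, ← ih]
    have hpred : ((fun k => decide (|((a :: b :: c :: r).getD (k + 1) (0,0,0)).1 - ((a :: b :: c :: r).getD k (0,0,0)).1| < t ∧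
          |((a :: b :: c :: r).getD (k + 2) (0,0,0)).1 - ((a :: b :: c :: r).getD (k + 1) (0,0,0)).1| < t)) ∘ Nat.succ)
        = (fun k => decide (|((b :: c :: r).getD (k + 1) (0,0,0)).1 - ((b :: c :: r).getD k (0,0,0)).1| < t ∧
          |((b :: c :: r).getD (k + 2) (0,0,0)).1 - ((b :: c :: r).getD (k + 1) (0,0,0)).1| < t)) := by
      funext k
      simp only [Function.comp_def, Nat.succ_eq_add_one, List.getD_cons_succ]
    rw [hpred]
    push_cast
    by_cases h1 : |b.1 - a.1| < t <;> by_cases h2 : |c.1 - b.1| < t <;>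
      simp [h1, h2, add_comm]
  termination_by ps.length

lemma pvA_eq_count3 (ps : List (Int × Int × Int)) (t : Int) :
    count_wall_hits ps t = pvCount3 t ps := by
  unfold count_wall_hits
  have hfun : (fun (wall_hits : Int) (i : Int) =>
      let p1 := PySem.List.pyGetD ps (i - 1) (0, 0, 0)
      let p2 := PySem.List.pyGetD ps i (0, 0, 0)
      let p3 := PySem.List.pyGetD ps (i + 1) (0, 0, 0)
      if |p2.1 - p1.1| < t ∧ |p3.1 - p2.1| < t then wall_hits + 1 else wall_hits)
      = (fun wall_hits i =>
        if (fun i => decide (|(PySem.List.pyGetD ps i (0,0,0)).1 - (PySem.List.pyGetD ps (i - 1) (0,0,0)).1| < t ∧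
            |(PySem.List.pyGetD ps (i + 1) (0,0,0)).1 - (PySem.List.pyGetD ps i (0,0,0)).1| < t)) i = true
        then wall_hits + 1 else wall_hits) := by
    funext acc i
    simp
  rw [hfun, PySem.List.foldl_count_if, PySem.List.pyRange_one, List.countP_map, zero_add]
  rw [show ((ps.length : Int) - 1 - 1).toNat = ps.length - 2 from by omega]
  rw [← pvA_countP_eq_count3 t ps]
  congr 1
  refine List.countP_congr (fun k _ => ?_)
  have e2 : (1 : Int) + (k : Int) = (((k + 1 : Nat)) : Int) := by push_cast; ring
  have e1 : (((k + 1 : Nat)) : Int) - 1 = ((k : Nat) : Int) := by push_cast; ring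
  have e3 : (((k + 1 : Nat)) : Int) + 1 = (((k + 2 : Nat)) : Int) := by push_cast; ring
  simp only [Function.comp_def, e2, e1, e3, PySem.List.pyGetD_natCast]

lemma pvB_eq_count3 (ps : List (Int × Int × Int)) (t : Int) :
    count_wall_hits_alt ps t = pvCount3 t ps := by
  unfold count_wall_hits_alt
  rw [pvB_eq_pairCount_gaps (ps.map (fun p => p.1)) t,
    pvPairCount_flags_eq_count3 t ps]

-- ===== VERDICT (by name: the statement is the Claim_ definition above) =====
theorem count_wall_hits_spec : Claim_equal_count_wall_hits := by
  intro ps t _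
  unfold Spec_count_wall_hits
  rw [pvA_eq_count3, pvB_eq_count3]
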